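-- pv_equiv track=rewrite | github.com/AnaClaraZoppiSerpa/Research | code/mds/mds.py | poly_xor_cost
-- ===== SOURCE A (Python) =====
-- ORDER = 8 #8 #4
--
-- def poly_xor_cost(poly):
--     mask = 1
--     set_bits = 0
--     current_bit = 0
--     while current_bit < ORDER:
--         if (poly & mask) != 0:
--             set_bits += 1
--         mask = mask << 1
--         current_bit += 1
--     return set_bits - 1
-- ===== SOURCE B (Python) =====
-- ORDER = 8
--
-- def poly_xor_cost(poly):
--     n = poly & 0xFF
--     count = 0
--     while n:
--         n &= n - 1
--         count += 1
--     return count - 1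
-- ===== Notes on version B (the rewrite author's own statement) =====
-- stated objective: alternative
-- what changed: Replaces the fixed 8-iteration mask-shifting scan with a single 0xFF mask followed by Brian Kernighan's bit-clearing loop (n &= n-1), iterating once per set bit instead of once per bit position.
import Mathlib
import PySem

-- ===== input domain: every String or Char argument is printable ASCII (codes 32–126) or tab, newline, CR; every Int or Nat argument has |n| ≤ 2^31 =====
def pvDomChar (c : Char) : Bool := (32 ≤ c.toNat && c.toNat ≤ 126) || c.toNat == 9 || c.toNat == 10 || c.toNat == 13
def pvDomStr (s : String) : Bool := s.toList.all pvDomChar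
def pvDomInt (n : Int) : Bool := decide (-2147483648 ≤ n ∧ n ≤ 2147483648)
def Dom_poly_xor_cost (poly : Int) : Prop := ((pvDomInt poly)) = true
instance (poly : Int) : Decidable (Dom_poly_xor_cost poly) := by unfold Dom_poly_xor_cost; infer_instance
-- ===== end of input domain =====

-- B replaces the fixed 8-position mask-shifting scan with a 0xFF mask followed by
-- Brian Kernighan's bit-clearing loop (n &= n-1), iterating once per set bit (objective: alternative).


-- ===== PORT A =====
-- A's while-loop: runs exactly ORDER = 8 times; ported with the remaining iteration
-- count (8 - current_bit) as the structural fuel, same state (mask, set_bits).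
def polyA_loop (poly : Int) (mask : Int) (setBits : Int) (fuel : Nat) : Int :=
  match fuel with
  | 0 => setBits
  | fuel + 1 =>
    polyA_loop poly (mask <<< 1)
      (if PySem.Int.band poly mask ≠ 0 then setBits + 1 else setBits) fuel

def poly_xor_cost (poly : Int) : Int := polyA_loop poly 1 0 8 - 1

-- ===== PORT B =====
-- B's while-loop: n = poly & 0xFF is nonnegative, so it is carried as a Nat (exact);
-- the fuel n itself bounds the iteration count (n &&& (n-1) < n whenever n ≠ 0).
def kernighanCount (fuel : Nat) (n : Nat) (count : Int) : Int :=
  match fuel with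
  | 0 => count
  | fuel + 1 => if n ≠ 0 then kernighanCount fuel (n &&& (n - 1)) (count + 1) else count

def poly_xor_cost_alt (poly : Int) : Int :=
  let n := (PySem.Int.band poly 255).toNat
  kernighanCount n n 0 - 1

-- ===== PRECONDITION & SPEC =====
def Spec_poly_xor_cost (poly : Int) (out : Int) : Prop := out = poly_xor_cost_alt poly
instance (poly : Int) (out : Int) : Decidable (Spec_poly_xor_cost poly out) := by unfold Spec_poly_xor_cost; infer_instance

-- ===== CLAIM (what is proved, stated in full; the proofs are below) =====
def Claim_equal_poly_xor_cost : Prop := ∀ (poly : Int), Dom_poly_xor_cost poly → Spec_poly_xor_cost poly (poly_xor_cost poly)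

-- ===== LEMMAS AND PROOFS =====

set_option maxRecDepth 10000 in
lemma pv_sub_eq_xor : ∀ r : Fin 256, 255 - r.val = 255 ^^^ r.val := by decide

lemma pv_testBit_255 (k : Nat) (hk : k < 8) : Nat.testBit 255 k = true := by
  rw [show (255:Nat) = 2^8 - 1 from rfl, Nat.testBit_two_pow_sub_one]
  simpa using hk

lemma pv_testBit_mod (t k : Nat) (hk : k < 8) :
    Nat.testBit (t % 256) k = Nat.testBit t k := by
  rw [show (256:Nat) = 2^8 from rfl, Nat.testBit_mod_two_pow]
  simp [hk]

lemma pv_testBit_compl (t k : Nat) (hk : k < 8) :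
    Nat.testBit (255 - t % 256) k = !(Nat.testBit t k) := by
  have hr : t % 256 < 256 := Nat.mod_lt _ (by norm_num)
  have h255 : 255 - t % 256 = 255 ^^^ t % 256 := pv_sub_eq_xor ⟨t % 256, hr⟩
  rw [h255, Nat.testBit_xor, pv_testBit_255 k hk, pv_testBit_mod t k hk]
  simp

-- Python's `x & 0xFF` is `x mod 256` (both signs).
lemma pv_band255 (x : Int) : PySem.Int.band x 255 = x.emod 256 := by
  unfold PySem.Int.band
  split_ifs with h1 h2 h2
  · rw [show (255:Int).toNat = 2^8-1 from rfl, Nat.and_two_pow_sub_one_eq_mod,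
      show (2:Nat)^8 = 256 from rfl]
    have h3 : (x.toNat : Int) = x := Int.toNat_of_nonneg h1
    have h4 : x.emod 256 = x % 256 := rfl
    omega
  · norm_num at h2
  · rw [show (255:Int).toNat = 2^8-1 from rfl, Nat.land_comm, Nat.and_two_pow_sub_one_eq_mod,
      show (2:Nat)^8 = 256 from rfl]
    have h4 : x.emod 256 = x % 256 := rfl
    omega
  · norm_num at h2

-- A single low bit of x is determined by x mod 256.
lemma pv_band_mod (x : Int) (k : Nat) (hk : k < 8) :
    PySem.Int.band x (2^k) = PySem.Int.band (x.emod 256) (2^k) := by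
  have hp : (0:Int) ≤ 2^k := by positivity
  have hm0 : (0:Int) ≤ x.emod 256 := Int.emod_nonneg x (by norm_num)
  have hm1 : x.emod 256 < 256 := Int.emod_lt_of_pos x (by norm_num)
  have htn : ((2:Int)^k).toNat = 2^k := by
    rw [show ((2:Int)^k) = ((2^k : Nat) : Int) by push_cast; ring, Int.toNat_natCast]
  unfold PySem.Int.band
  rcases le_or_gt 0 x with h1 | h1
  · rw [if_pos h1, if_pos hp, if_pos hm0, if_pos hp, htn]
    have hx : (x.emod 256).toNat = x.toNat % 256 := by
      have : x.emod 256 = x % 256 := rfl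
      omega
    rw [hx, Nat.and_two_pow, Nat.and_two_pow, pv_testBit_mod _ k hk]
  · rw [if_neg (by omega), if_pos hp, if_pos hm0, if_pos hp, htn]
    have hx : (x.emod 256).toNat = 255 - (-x - 1).toNat % 256 := by
      have : x.emod 256 = x % 256 := rfl
      omega
    rw [hx, Nat.and_two_pow, pv_testBit_compl _ k hk, Nat.two_pow_and]
    cases h : Nat.testBit ((-x - 1).toNat) k <;> simp

lemma pv_A_mod (x : Int) : poly_xor_cost x = poly_xor_cost (x.emod 256) := by
  have b0 : PySem.Int.band x 1 = PySem.Int.band (x.emod 256) 1 := by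
    simpa using pv_band_mod x 0 (by norm_num)
  have b1 : PySem.Int.band x 2 = PySem.Int.band (x.emod 256) 2 := by
    simpa using pv_band_mod x 1 (by norm_num)
  have b2 : PySem.Int.band x 4 = PySem.Int.band (x.emod 256) 4 := by
    simpa using pv_band_mod x 2 (by norm_num)
  have b3 : PySem.Int.band x 8 = PySem.Int.band (x.emod 256) 8 := by
    simpa using pv_band_mod x 3 (by norm_num)
  have b4 : PySem.Int.band x 16 = PySem.Int.band (x.emod 256) 16 := by
    simpa using pv_band_mod x 4 (by norm_num)
  have b5 : PySem.Int.band x 32 = PySem.Int.band (x.emod 256) 32 := by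
    simpa using pv_band_mod x 5 (by norm_num)
  have b6 : PySem.Int.band x 64 = PySem.Int.band (x.emod 256) 64 := by
    simpa using pv_band_mod x 6 (by norm_num)
  have b7 : PySem.Int.band x 128 = PySem.Int.band (x.emod 256) 128 := by
    simpa using pv_band_mod x 7 (by norm_num)
  have s1 : (1:Int) <<< 1 = 2 := by decide
  have s2 : (2:Int) <<< 1 = 4 := by decide
  have s4 : (4:Int) <<< 1 = 8 := by decide
  have s8 : (8:Int) <<< 1 = 16 := by decide
  have s16 : (16:Int) <<< 1 = 32 := by decide
  have s32 : (32:Int) <<< 1 = 64 := by decide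
  have s64 : (64:Int) <<< 1 = 128 := by decide
  simp only [poly_xor_cost, polyA_loop]
  norm_num [s1, s2, s4, s8, s16, s32, s64, b0, b1, b2, b3, b4, b5, b6, b7]

lemma pv_B_mod (x : Int) : poly_xor_cost_alt x = poly_xor_cost_alt (x.emod 256) := by
  simp only [poly_xor_cost_alt, pv_band255]
  have h : (x.emod 256).emod 256 = x.emod 256 := Int.emod_emod_of_dvd x dvd_rfl
  rw [h]

set_option maxRecDepth 100000 in
lemma pv_fin_eq : ∀ r : Fin 256, poly_xor_cost (r.val : Int) = poly_xor_cost_alt (r.val : Int) := by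
  decide

-- ===== VERDICT (by name: the statement is the Claim_ definition above) =====
theorem poly_xor_cost_spec : Claim_equal_poly_xor_cost := by
  intro poly _
  show poly_xor_cost poly = poly_xor_cost_alt poly
  have hm0 : (0:Int) ≤ poly.emod 256 := Int.emod_nonneg poly (by norm_num)
  have hm1 : poly.emod 256 < 256 := Int.emod_lt_of_pos poly (by norm_num)
  have hr : (poly.emod 256).toNat < 256 := by omega
  have hc : (((poly.emod 256).toNat : Nat) : Int) = poly.emod 256 := Int.toNat_of_nonneg hm0
  have := pv_fin_eq ⟨(poly.emod 256).toNat, hr⟩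
  rw [pv_A_mod, pv_B_mod, ← hc]
  exact this
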